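-- pv_equiv track=rewrite | github.com/peterk87/heidelberg_subtyping | heidelberg_subtyping/utils.py | find_inconsistent_subtypes
-- ===== SOURCE A (Python) =====
-- def compare_subtypes(a, b):
--     for x, y in zip(a, b):
--         if x != y:
--             return False
--     return True
--
-- def find_inconsistent_subtypes(subtypes):
--     from collections import Counter
--     incon = []
--     for i in range(len(subtypes) - 1):
--         a = subtypes[i]
--         for j in range(i + 1, len(subtypes)):
--             b = subtypes[j]
--             is_consistent = compare_subtypes(a, b)
--             if not is_consistent:
--                 incon.append((a, b))
--     l = []
--     for a, b in incon:
--         astr = '.'.join([str(x) for x in a])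
--         bstr = '.'.join([str(x) for x in b])
--         l += [astr, bstr]
--     c = Counter(l)
--     incon_subtypes = []
--     for subtype, freq in c.most_common():
--         if freq > 1:
--             incon_subtypes.append(subtype)
--         else:
--             break
--     return incon_subtypes
-- ===== SOURCE B (Python) =====
-- def find_inconsistent_subtypes(subtypes):
--     # Group identical subtypes first: multiplicity per distinct subtype, and its
--     # dotted string computed ONCE per distinct subtype (A re-joins per pair).
--     mult = {}
--     for t in subtypes:
--         k = tuple(t)
--         mult[k] = mult.get(k, 0) + 1
--     gs = [(k, '.'.join(str(x) for x in k), m) for k, m in mult.items()]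
--     # inconsistency counting over DISTINCT subtypes only, weighted by
--     # multiplicity products (equal subtypes are always consistent)
--     cnt = {}
--     for u in range(len(gs)):
--         tu, su, mu = gs[u]
--         for v in range(u + 1, len(gs)):
--             tv, sv, mv = gs[v]
--             if any(x != y for x, y in zip(tu, tv)):
--                 cnt[su] = cnt.get(su, 0) + mu * mv
--                 cnt[sv] = cnt.get(sv, 0) + mu * mv
--     res = []
--     for s, c in sorted(cnt.items(), key=lambda kv: kv[1], reverse=True):
--         if c > 1:
--             res.append(s)
--         else:
--             break
--     return res
-- ===== Notes on version B (the rewrite author's own statement) =====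
-- stated objective: faster
-- what changed: B never scans the O(n^2) element pairs: it first groups identical subtypes into a multiplicity map (one pass), then counts inconsistencies over DISTINCT subtypes only, adding multiplicity products mu*mv per inconsistent group pair, so the pair scan shrinks from n^2 elements to g^2 distinct groups and each subtype string is joined once instead of per pair.
import Mathlib
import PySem

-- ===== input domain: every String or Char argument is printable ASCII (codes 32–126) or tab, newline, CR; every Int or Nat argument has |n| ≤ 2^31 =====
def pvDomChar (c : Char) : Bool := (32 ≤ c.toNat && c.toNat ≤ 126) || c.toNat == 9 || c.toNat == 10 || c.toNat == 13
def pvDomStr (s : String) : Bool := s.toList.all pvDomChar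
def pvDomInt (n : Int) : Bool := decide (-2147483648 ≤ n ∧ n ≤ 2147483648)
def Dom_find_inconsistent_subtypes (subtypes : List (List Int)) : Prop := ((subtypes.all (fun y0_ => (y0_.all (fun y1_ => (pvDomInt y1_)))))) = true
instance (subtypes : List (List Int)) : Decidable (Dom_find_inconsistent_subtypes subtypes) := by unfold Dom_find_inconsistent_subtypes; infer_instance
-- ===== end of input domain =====

-- B replaces A's scan over all O(n^2) element pairs by grouping identical subtypes first and
-- counting inconsistencies over DISTINCT subtypes only, weighted by multiplicity products
-- with each distinct subtype's dotted string built once instead of per pair (objective: faster; measured).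

-- ===== PORT A =====
-- zip-based element loop of compare_subtypes (returns False at the first differing position)
def compare_subtypes : List Int → List Int → Bool
  | x :: xs, y :: ys => if x ≠ y then false else compare_subtypes xs ys
  | _, _ => true

-- '.'.join(str(x) for x in t)
def pvJoin (t : List Int) : String := PySem.Str.join "." (t.map PySem.Int.toStr)

-- the 'for subtype, freq in c.most_common(): if freq > 1: append else: break' loop
def pvMostCommonTake : List (String × Int) → List String
  | (s, f) :: rest => if f > 1 then s :: pvMostCommonTake rest else []
  | [] => []

def find_inconsistent_subtypes (subtypes : List (List Int)) : List String :=
  let n : Int := subtypes.length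
  -- indices produced by range are always in bounds, so pyGetD is exact here
  let incon : List (List Int × List Int) :=
    (PySem.List.pyRange 0 (n - 1)).foldl (fun acc i =>
      let a := PySem.List.pyGetD subtypes i []
      (PySem.List.pyRange (i + 1) n).foldl (fun acc j =>
        let b := PySem.List.pyGetD subtypes j []
        let is_consistent := compare_subtypes a b
        if !is_consistent then acc ++ [(a, b)] else acc) acc) []
  let l : List String := incon.foldl (fun l p => l ++ [pvJoin p.1, pvJoin p.2]) []
  let c := PySem.Dict.counter l
  -- c.most_common() = sorted(c.items(), key=itemgetter(1), reverse=True)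
  pvMostCommonTake (PySem.List.sorted c.items (fun kv => kv.2) true)

-- ===== PORT B =====
-- the 'for s, c in sorted(...): if c > 1: res.append(s) else: break' loop of Source B
def pvTakeB : List (String × Int) → List String
  | (s, c) :: rest => if c > 1 then s :: pvTakeB rest else []
  | [] => []

def find_inconsistent_subtypes_alt (subtypes : List (List Int)) : List String :=
  -- mult[k] = mult.get(k, 0) + 1 over the subtypes (tuple(t) is t itself here)
  let mult : PySem.Dict (List Int) Int :=
    subtypes.foldl (fun d t => d.insert t (d.getD t 0 + 1)) PySem.Dict.empty
  -- gs = [(k, '.'.join(str(x) for x in k), m) for k, m in mult.items()]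
  let gs : List (List Int × String × Int) := mult.items.map (fun p => (p.1, pvJoin p.1, p.2))
  let n : Int := gs.length
  -- pair loop over the DISTINCT subtypes, weighted by multiplicity products;
  -- indices produced by range are always in bounds, so pyGetD is exact here;
  -- any(x != y for x, y in zip(tu, tv)) is List.any over List.zip
  let cnt : PySem.Dict String Int :=
    (PySem.List.pyRange 0 n).foldl (fun d u =>
      let pu := PySem.List.pyGetD gs u ([], "", 0)
      (PySem.List.pyRange (u + 1) n).foldl (fun d v =>
        let pv := PySem.List.pyGetD gs v ([], "", 0)
        if (pu.1.zip pv.1).any (fun c => decide (c.1 ≠ c.2)) then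
          let d := d.insert pu.2.1 (d.getD pu.2.1 0 + pu.2.2 * pv.2.2)
          d.insert pv.2.1 (d.getD pv.2.1 0 + pu.2.2 * pv.2.2)
        else d) d) PySem.Dict.empty
  pvTakeB (PySem.List.sorted cnt.items (fun kv => kv.2) true)

-- ===== PRECONDITION & SPEC =====
def Spec_find_inconsistent_subtypes (subtypes : List (List Int)) (out : List String) : Prop := out = find_inconsistent_subtypes_alt subtypes
instance (subtypes : List (List Int)) (out : List String) : Decidable (Spec_find_inconsistent_subtypes subtypes out) := by unfold Spec_find_inconsistent_subtypes; infer_instance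

-- ===== CLAIM (what is proved, stated in full; the proofs are below) =====
def Claim_equal_find_inconsistent_subtypes : Prop := ∀ (subtypes : List (List Int)), Dom_find_inconsistent_subtypes subtypes → Spec_find_inconsistent_subtypes subtypes (find_inconsistent_subtypes subtypes)

-- ===== LEMMAS AND PROOFS =====

-- ---------- proof-side vocabulary ----------

-- the inconsistency test, as a symmetric boolean relation on subtypes
def pvR (a b : List Int) : Bool := !(List.take b.length a == List.take a.length b)

-- emissions of the triangular pair loop over zs, row by row (row z = z against every later element)
def pvBlocks {γ σ : Type} (g : γ → γ → List σ) : List γ → List σ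
  | [] => []
  | z :: t => t.flatMap (g z) ++ pvBlocks g t

-- the triangular pair FOLD over zs (row 0 folded first), the common shape of both ports' loops
def pvPairFold {γ δ : Type} (F : δ → γ → γ → δ) : List γ → δ → δ
  | [], i => i
  | z :: t, i => pvPairFold F t (t.foldl (fun d v => F d z v) i)

-- A's emission block, and B's weighted block
def pvBlk1 (a b : List Int) : List String := if pvR a b then [pvJoin a, pvJoin b] else []
def pvBlkW (u v : List Int × Nat) : List String :=
  if pvR u.1 v.1 then List.replicate (u.2 * v.2) (pvJoin u.1) ++ List.replicate (u.2 * v.2) (pvJoin v.1) else []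

def pvP (xs : List (List Int)) : List String := pvBlocks pvBlk1 xs
def pvWgs (xs : List (List Int)) : List (List Int × Nat) :=
  (PySem.List.dedup xs).map (fun t => (t, xs.count t))
def pvW (xs : List (List Int)) : List String := pvBlocks pvBlkW (pvWgs xs)

-- filtered first-occurrence list, and the "equal dedup modulo p" relation
def pvDfil (p : String → Bool) (L : List String) : List String := (PySem.List.dedup L).filter p
def pvDq (p : String → Bool) (A B : List String) : Prop :=
  pvDfil p A = pvDfil p B ∧ ∀ y, p y = true → (y ∈ A ↔ y ∈ B)

-- ---------- basic facts about pvR ----------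

theorem pvR_symm (a b : List Int) : pvR a b = pvR b a := by
  unfold pvR
  rw [Bool.beq_comm]

theorem pvR_self (a : List Int) : pvR a a = false := by
  simp [pvR]

-- ---------- dedup structure lemmas ----------

theorem pv_foldl_add {α : Type} [BEq α] [LawfulBEq α] :
    ∀ (B acc : List α), B.foldl PySem.Set.add acc
      = acc ++ (PySem.List.dedup B).filter (fun b => !acc.contains b) := by
  intro B
  induction B with
  | nil => intro acc; simp [PySem.List.dedup, PySem.Set.ofList_eq_foldl]
  | cons b t ih =>
    intro acc
    have hded : PySem.List.dedup (b :: t) = [b] ++ (PySem.List.dedup t).filter (fun y => !([b].contains y)) := by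
      have : PySem.List.dedup (b :: t) = List.foldl PySem.Set.add [b] t := by
        simp [PySem.List.dedup, PySem.Set.ofList_eq_foldl, PySem.Set.add]
      rw [this, ih]
    rw [List.foldl_cons, ih, hded]
    by_cases hb : acc.contains b = true
    · have hb' : b ∈ acc := by simpa using hb
      have hadd : PySem.Set.add acc b = acc := by simp [PySem.Set.add, hb']
      rw [hadd, List.filter_append]
      have h1 : List.filter (fun y => !acc.contains y) [b] = [] := by
        simp [List.filter, hb']
      rw [h1, List.filter_filter]
      have h2 : ∀ y, ((!acc.contains y) && !([b].contains y)) = (!acc.contains y) := by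
        intro y
        by_cases hyb : y = b
        · subst hyb; simp [hb']
        · simp [List.contains_eq_mem, hyb]
      simp only [h2, List.nil_append]
    · have hb' : b ∉ acc := by simpa using hb
      have hadd : PySem.Set.add acc b = acc ++ [b] := by simp [PySem.Set.add, hb']
      rw [hadd, List.filter_append]
      have h1 : List.filter (fun y => !acc.contains y) [b] = [b] := by
        simp [List.filter, hb']
      rw [h1, List.filter_filter, List.append_assoc]
      congr 1
      congr 1
      apply List.filter_congr
      intro y _
      by_cases hyb : y = b
      · subst hyb; simp [List.contains_eq_mem, hb']
      · simp [List.contains_eq_mem, hyb]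

theorem pv_dedup_cons {α : Type} [BEq α] [LawfulBEq α] (x : α) (t : List α) :
    PySem.List.dedup (x :: t) = x :: (PySem.List.dedup t).filter (fun y => !(y == x)) := by
  have : PySem.List.dedup (x :: t) = List.foldl PySem.Set.add [x] t := by
    simp [PySem.List.dedup, PySem.Set.ofList_eq_foldl, PySem.Set.add]
  rw [this, pv_foldl_add]
  simp only [List.singleton_append, List.cons.injEq, true_and]
  apply List.filter_congr
  intro y _
  simp [List.contains_eq_mem]

theorem pv_dedup_append {α : Type} [BEq α] [LawfulBEq α] (A B : List α) :
    PySem.List.dedup (A ++ B) = PySem.List.dedup A ++ (PySem.List.dedup B).filter (fun b => !A.contains b) := by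
  have h1 : PySem.List.dedup (A ++ B) = List.foldl PySem.Set.add (PySem.List.dedup A) B := by
    simp [PySem.List.dedup, PySem.Set.ofList_eq_foldl, List.foldl_append]
  rw [h1, pv_foldl_add]
  congr 1
  apply List.filter_congr
  intro y _
  have : (PySem.List.dedup A).contains y = A.contains y := by
    simp [List.contains_eq_mem]
  rw [this]

-- ---------- pvDq: congruence machinery ----------

theorem pvDq_refl (p : String → Bool) (A : List String) : pvDq p A A := ⟨rfl, fun _ _ => Iff.rfl⟩

theorem pvDq_trans {p : String → Bool} {A B C : List String} (h1 : pvDq p A B) (h2 : pvDq p B C) : pvDq p A C :=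
  ⟨h1.1.trans h2.1, fun y hy => (h1.2 y hy).trans (h2.2 y hy)⟩

theorem pvDq_of_top {A B : List String} (h : pvDq (fun _ => true) A B) (p : String → Bool) : pvDq p A B := by
  obtain ⟨h1, h2⟩ := h
  have hded : PySem.List.dedup A = PySem.List.dedup B := by
    simpa [pvDfil, List.filter_true] using h1
  exact ⟨by simp only [pvDfil]; rw [hded], fun y _ => h2 y rfl⟩

-- all elements of L fail p
theorem pvDq_nil_of_fails {p : String → Bool} {L : List String} (h : ∀ y ∈ L, p y = false) : pvDq p L [] := by
  constructor
  · have : pvDfil p L = [] := by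
      simp only [pvDfil, List.filter_eq_nil_iff]
      intro y hy
      simp [h y ((PySem.List.mem_dedup L y).1 hy)]
    rw [this]; rfl
  · intro y hy
    constructor
    · intro hyL; rw [h y hyL] at hy; cases hy
    · intro hc; cases hc

theorem pvDq_append {p : String → Bool} {A B C C' : List String}
    (hAB : pvDq p A B) (hCC : pvDq (fun y => p y && decide (y ∉ A)) C C') :
    pvDq p (A ++ C) (B ++ C') := by
  obtain ⟨h1, h2⟩ := hAB
  obtain ⟨h3, h4⟩ := hCC
  have hfil : ∀ (X : List String) (D : List String),
      pvDfil p (X ++ D) = pvDfil p X ++ (pvDfil p D).filter (fun y => !X.contains y) := by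
    intro X D
    simp only [pvDfil, pv_dedup_append, List.filter_append]
    congr 1
    rw [List.filter_filter, List.filter_filter]
    apply List.filter_congr
    intro y _
    rw [Bool.and_comm]
  have h3' : (pvDfil p C).filter (fun y => !A.contains y) = (pvDfil p C').filter (fun y => !A.contains y) := by
    have e1 : ∀ (D : List String), (pvDfil p D).filter (fun y => !A.contains y)
        = pvDfil (fun y => p y && decide (y ∉ A)) D := by
      intro D
      simp only [pvDfil, List.filter_filter]
      apply List.filter_congr
      intro y _
      simp [List.contains_eq_mem, Bool.and_comm]
    rw [e1, e1, h3]
  have h3'' : (pvDfil p C').filter (fun y => !A.contains y) = (pvDfil p C').filter (fun y => !B.contains y) := by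
    apply List.filter_congr
    intro y hy
    have hpy : p y = true := by
      simp only [pvDfil, List.mem_filter] at hy
      exact hy.2
    have := h2 y hpy
    simp only [List.contains_eq_mem]
    by_cases hA : y ∈ A
    · simp [hA, this.1 hA]
    · have hB : y ∉ B := fun hB => hA (this.2 hB)
      simp [hA, hB]
  constructor
  · rw [hfil, hfil, h1, h3', h3'']
  · intro y hy
    simp only [List.mem_append]
    by_cases hA : y ∈ A
    · simp [hA, h2 y hy |>.1 hA]
    · have hB : y ∉ B := fun hB => hA ((h2 y hy).2 hB)
      have hCC' : y ∈ C ↔ y ∈ C' := h4 y (by simp [hy, hA])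
      simp [hA, hB, hCC']

-- ---------- dedup of the pair emissions: removing a fully-shadowed element ----------

theorem pv_band_false {p q : String → Bool} (y : String) (h : p y = false) : (p y && q y) = false := by
  rw [h, Bool.false_and]

theorem pv_mem_blk1 {y : String} {w v : List Int} (hy : y ∈ pvBlk1 w v) :
    pvR w v = true ∧ (y = pvJoin w ∨ y = pvJoin v) := by
  by_cases hR : pvR w v = true
  · refine ⟨hR, ?_⟩
    simp only [pvBlk1, hR, if_true] at hy
    simpa using hy
  · simp [pvBlk1, Bool.eq_false_iff.2 hR] at hy

-- remove z from a row's source list: only z's block (whose strings all fail p) disappears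
theorem pvRow_rem (w : List Int) (z : List Int) :
    ∀ (ws : List (List Int)) (p : String → Bool),
      (pvR w z = true → p (pvJoin w) = false ∧ p (pvJoin z) = false) →
      pvDq p (ws.flatMap (pvBlk1 w)) ((ws.filter (· ≠ z)).flatMap (pvBlk1 w)) := by
  intro ws
  induction ws with
  | nil => intro p _; exact pvDq_refl p []
  | cons y t ih =>
    intro p hz
    have hz' : ∀ q : String → Bool,
        pvR w z = true → (p (pvJoin w) && q (pvJoin w)) = false ∧ (p (pvJoin z) && q (pvJoin z)) = false := by
      intro q hR
      exact ⟨pv_band_false _ (hz hR).1, pv_band_false _ (hz hR).2⟩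
    by_cases hy : y = z
    · subst hy
      have hfil : (y :: t).filter (· ≠ y) = t.filter (· ≠ y) := by simp
      rw [hfil, List.flatMap_cons]
      have h0 : pvDq p (pvBlk1 w y) [] := by
        apply pvDq_nil_of_fails
        intro s hs
        obtain ⟨hR, hor⟩ := pv_mem_blk1 hs
        rcases hor with h | h <;> subst h
        · exact (hz hR).1
        · exact (hz hR).2
      have := pvDq_append h0 (ih _ (hz' (fun s => decide (s ∉ pvBlk1 w y))))
      simpa using this
    · have hfil : (y :: t).filter (· ≠ z) = y :: t.filter (· ≠ z) := by simp [hy]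
      rw [hfil, List.flatMap_cons, List.flatMap_cons]
      exact pvDq_append (pvDq_refl p _) (ih _ (hz' (fun s => decide (s ∉ pvBlk1 w y))))

-- remove x from the pair loop's source list, given every string x ever emits fails p
theorem pvP_rem (x : List Int) :
    ∀ (ws : List (List Int)) (p : String → Bool),
      (∀ w ∈ ws, pvR x w = true → p (pvJoin x) = false ∧ p (pvJoin w) = false) →
      pvDq p (pvP ws) (pvP (ws.filter (· ≠ x))) := by
  intro ws
  induction ws with
  | nil => intro p _; exact pvDq_refl p []
  | cons w t ih =>
    intro p hp
    have hp' : ∀ q : String → Bool, ∀ w' ∈ t,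
        pvR x w' = true → (p (pvJoin x) && q (pvJoin x)) = false ∧ (p (pvJoin w') && q (pvJoin w')) = false := by
      intro q w' hw' hR
      exact ⟨pv_band_false _ (hp w' (List.mem_cons_of_mem _ hw') hR).1,
             pv_band_false _ (hp w' (List.mem_cons_of_mem _ hw') hR).2⟩
    by_cases hw : w = x
    · subst hw
      have hfil : (w :: t).filter (· ≠ w) = t.filter (· ≠ w) := by simp
      rw [hfil]
      show pvDq p (t.flatMap (pvBlk1 w) ++ pvP t) (pvP (t.filter (· ≠ w)))
      have h0 : pvDq p (t.flatMap (pvBlk1 w)) [] := by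
        apply pvDq_nil_of_fails
        intro s hs
        rw [List.mem_flatMap] at hs
        obtain ⟨w', hw', hsblk⟩ := hs
        obtain ⟨hR, hor⟩ := pv_mem_blk1 hsblk
        have := hp w' (List.mem_cons_of_mem _ hw') hR
        rcases hor with h | h <;> subst h
        · exact this.1
        · exact this.2
      have := pvDq_append h0 (ih _ (hp' (fun s => decide (s ∉ List.flatMap (pvBlk1 w) t))))
      simpa using this
    · have hfil : (w :: t).filter (· ≠ x) = w :: t.filter (· ≠ x) := by simp [hw]
      rw [hfil]
      show pvDq p (t.flatMap (pvBlk1 w) ++ pvP t)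
        ((t.filter (· ≠ x)).flatMap (pvBlk1 w) ++ pvP (t.filter (· ≠ x)))
      have hrow : pvDq p (t.flatMap (pvBlk1 w)) ((t.filter (· ≠ x)).flatMap (pvBlk1 w)) := by
        apply pvRow_rem w x t p
        intro hR
        have hR' : pvR x w = true := by rw [pvR_symm]; exact hR
        have := hp w (List.mem_cons_self) hR'
        exact ⟨this.2, this.1⟩
      exact pvDq_append hrow (ih _ (hp' (fun s => decide (s ∉ List.flatMap (pvBlk1 w) t))))

-- rewriting the two filter spellings into each other
theorem pv_filter_beq_ne' {β : Type} [BEq β] [LawfulBEq β] [DecidableEq β] (L : List β) (z : β) :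
    L.filter (fun y => !(y == z)) = L.filter (· ≠ z) := by
  apply List.filter_congr
  intro y _
  by_cases h : y = z
  · subst h; simp
  · simp [h]

theorem pv_filter_beq_ne (L : List (List Int)) (z : List Int) :
    L.filter (fun y => !(y == z)) = L.filter (· ≠ z) := by
  apply List.filter_congr
  intro y _
  by_cases h : y = z
  · subst h; simp
  · simp [h]

-- a row over zs has the same dedup as the row over dedup zs
theorem pvRow_dedup (x : List Int) :
    ∀ (zs : List (List Int)),
      pvDq (fun _ => true) (zs.flatMap (pvBlk1 x)) ((PySem.List.dedup zs).flatMap (pvBlk1 x)) := by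
  intro zs
  induction zs with
  | nil => exact pvDq_refl _ []
  | cons z t ih =>
    rw [pv_dedup_cons, pv_filter_beq_ne, List.flatMap_cons, List.flatMap_cons]
    by_cases hz : z ∈ t
    · apply pvDq_append (pvDq_refl _ _)
      refine pvDq_trans (pvDq_of_top ih _) ?_
      apply pvRow_rem x z (PySem.List.dedup t)
      intro hR
      constructor <;>
      · simp only [Bool.true_and, decide_eq_false_iff_not, Decidable.not_not, pvBlk1, hR, if_true]
        simp
    · have hno : (PySem.List.dedup t).filter (· ≠ z) = PySem.List.dedup t := by
        apply List.filter_eq_self.mpr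
        intro y hy
        have : y ∈ t := (PySem.List.mem_dedup t y).1 hy
        simp
        rintro rfl
        exact hz this
      rw [hno]
      exact pvDq_append (pvDq_refl _ _) (pvDq_of_top ih _)

-- MAIN dedup lemma (pvDq form): pair emissions over xs and over dedup xs
theorem pvP_dedup_dq : ∀ (xs : List (List Int)),
    pvDq (fun _ => true) (pvP xs) (pvP (PySem.List.dedup xs)) := by
  intro xs
  induction xs with
  | nil => exact pvDq_refl _ []
  | cons x t ih =>
    rw [pv_dedup_cons, pv_filter_beq_ne]
    show pvDq _ (t.flatMap (pvBlk1 x) ++ pvP t)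
      (((PySem.List.dedup t).filter (· ≠ x)).flatMap (pvBlk1 x) ++ pvP ((PySem.List.dedup t).filter (· ≠ x)))
    apply pvDq_append
    · refine pvDq_trans (pvRow_dedup x t) ?_
      apply pvRow_rem x x (PySem.List.dedup t)
      intro hR
      rw [pvR_self] at hR
      cases hR
    · refine pvDq_trans (pvDq_of_top ih _) ?_
      apply pvP_rem x (PySem.List.dedup t)
      intro w hw hR
      constructor <;>
      · simp only [Bool.true_and, decide_eq_false_iff_not, Decidable.not_not]
        rw [List.mem_flatMap]
        refine ⟨w, (PySem.List.mem_dedup t w).1 hw, ?_⟩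
        simp [pvBlk1, hR]

theorem pvP_dedup (xs : List (List Int)) :
    PySem.List.dedup (pvP xs) = PySem.List.dedup (pvP (PySem.List.dedup xs)) := by
  have h := (pvP_dedup_dq xs).1
  simpa [pvDfil, List.filter_true] using h

-- dedup of a replicate block
theorem pv_dedup_replicate {α : Type} [BEq α] [LawfulBEq α] (a : α) :
    ∀ (n : Nat), 1 ≤ n → PySem.List.dedup (List.replicate n a) = [a] := by
  intro n
  induction n with
  | zero => intro h; cases h
  | succ m ih =>
    intro _
    rw [List.replicate_succ, pv_dedup_cons]
    rcases Nat.eq_zero_or_pos m with hm | hm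
    · subst hm; rfl
    · rw [ih hm]; simp

-- weighted blocks have the same dedup (and members) as weight-1 blocks
theorem pvBlkW_dq (u v : List Int × Nat) (hu : 1 ≤ u.2) (hv : 1 ≤ v.2) :
    pvDq (fun _ => true) (pvBlkW u v) (pvBlk1 u.1 v.1) := by
  by_cases hR : pvR u.1 v.1 = true
  · have hn : 1 ≤ u.2 * v.2 := Nat.one_le_iff_ne_zero.mpr (by positivity)
    constructor
    · simp only [pvDfil, List.filter_true, pvBlkW, pvBlk1, hR, if_true]
      rw [pv_dedup_append, pv_dedup_replicate _ _ hn, pv_dedup_replicate _ _ hn, pv_dedup_cons, pv_dedup_cons]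
      simp only [PySem.List.dedup, PySem.Set.ofList_eq_foldl]
      by_cases hab : pvJoin v.1 = pvJoin u.1
      · simp [hab, List.contains_eq_mem, List.mem_replicate, Nat.one_le_iff_ne_zero.mp hn]
      · simp [hab, List.contains_eq_mem, List.mem_replicate, Nat.one_le_iff_ne_zero.mp hn]
    · intro y _
      simp [pvBlkW, pvBlk1, hR, List.mem_replicate, Nat.one_le_iff_ne_zero.mp hn]
  · have hR' : pvR u.1 v.1 = false := Bool.eq_false_iff.2 hR
    simp only [pvBlkW, pvBlk1, hR']
    exact pvDq_refl _ []

theorem pvWnorm : ∀ (gs : List (List Int × Nat)), (∀ q ∈ gs, 1 ≤ q.2) →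
    pvDq (fun _ => true) (pvBlocks pvBlkW gs) (pvBlocks pvBlk1 (gs.map Prod.fst)) := by
  intro gs
  induction gs with
  | nil => intro _; exact pvDq_refl _ []
  | cons u t ih =>
    intro hw
    show pvDq _ (t.flatMap (pvBlkW u) ++ pvBlocks pvBlkW t)
      ((t.map Prod.fst).flatMap (pvBlk1 u.1) ++ pvBlocks pvBlk1 (t.map Prod.fst))
    apply pvDq_append
    · -- row congruence, block by block
      clear ih
      induction t with
      | nil => exact pvDq_refl _ []
      | cons v r ihr =>
        rw [List.flatMap_cons, List.map_cons, List.flatMap_cons]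
        apply pvDq_append
        · exact pvBlkW_dq u v (hw u List.mem_cons_self)
            (hw v (List.mem_cons_of_mem _ List.mem_cons_self))
        · apply pvDq_of_top
          apply ihr
          intro q hq
          rcases List.mem_cons.1 hq with h | h
          · exact hw q (by simp [h])
          · exact hw q (List.mem_cons_of_mem _ (List.mem_cons_of_mem _ h))
    · apply pvDq_of_top
      apply ih
      intro q hq
      exact hw q (List.mem_cons_of_mem _ hq)

theorem pvW_dedup (xs : List (List Int)) :
    PySem.List.dedup (pvW xs) = PySem.List.dedup (pvP (PySem.List.dedup xs)) := by
  have hmap : (pvWgs xs).map Prod.fst = PySem.List.dedup xs := by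
    simp [pvWgs, Function.comp_def]
  have hw : ∀ q ∈ pvWgs xs, 1 ≤ q.2 := by
    intro q hq
    simp only [pvWgs, List.mem_map] at hq
    obtain ⟨t, ht, rfl⟩ := hq
    exact List.count_pos_iff.mpr ((PySem.List.mem_dedup xs t).1 ht)
  have h := (pvWnorm (pvWgs xs) hw).1
  rw [hmap] at h
  simpa [pvDfil, List.filter_true, pvW, pvP] using h

-- ---------- counts ----------

-- closed form for the number of occurrences of a in the weighted pair emissions
theorem pvBlocks_count {γ : Type} (tup : γ → List Int) (w : γ → Nat) (a : String) :
    ∀ (zs : List γ),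
      (pvBlocks (fun u v => if pvR (tup u) (tup v) then
          List.replicate (w u * w v) (pvJoin (tup u)) ++ List.replicate (w u * w v) (pvJoin (tup v)) else []) zs).count a
      = (zs.map (fun u => (if pvJoin (tup u) = a then 1 else 0) * w u *
          (zs.map (fun v => w v * (if pvR (tup u) (tup v) then 1 else 0))).sum)).sum := by
  intro zs
  induction zs with
  | nil => simp [pvBlocks]
  | cons z t ih =>
    have hrow : (List.flatMap (fun v => if pvR (tup z) (tup v) then
          List.replicate (w z * w v) (pvJoin (tup z)) ++ List.replicate (w z * w v) (pvJoin (tup v)) else []) t).count a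
        = (if pvJoin (tup z) = a then 1 else 0) * w z *
            (t.map (fun v => w v * (if pvR (tup z) (tup v) then 1 else 0))).sum
          + (t.map (fun v => (if pvJoin (tup v) = a then 1 else 0) * w v *
              (w z * (if pvR (tup v) (tup z) then 1 else 0)))).sum := by
      rw [List.count_flatMap]
      have hpt : ∀ v ∈ t, (List.count a ∘ fun v => if pvR (tup z) (tup v) then
            List.replicate (w z * w v) (pvJoin (tup z)) ++ List.replicate (w z * w v) (pvJoin (tup v)) else []) v
          = (if pvJoin (tup z) = a then 1 else 0) * w z * (w v * (if pvR (tup z) (tup v) then 1 else 0))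
            + (if pvJoin (tup v) = a then 1 else 0) * w v * (w z * (if pvR (tup v) (tup z) then 1 else 0)) := by
        intro v _
        simp only [Function.comp_apply]
        rw [pvR_symm (tup v) (tup z)]
        by_cases hR : pvR (tup z) (tup v) = true
        · simp only [hR, if_true, List.count_append, List.count_replicate, beq_iff_eq]
          by_cases h1 : pvJoin (tup z) = a <;> by_cases h2 : pvJoin (tup v) = a <;>
            simp [h1, h2] <;> try ring
        · simp [Bool.eq_false_iff.2 hR]
      rw [List.map_congr_left hpt, List.sum_map_add]
      congr 1
      rw [← List.sum_map_mul_left]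
    simp only [pvBlocks, List.count_append, hrow, ih, List.map_cons, List.sum_cons]
    rw [pvR_self]
    have hsplit : (t.map (fun u => (if pvJoin (tup u) = a then 1 else 0) * w u *
        (w z * (if pvR (tup u) (tup z) then 1 else 0) +
          (t.map (fun v => w v * (if pvR (tup u) (tup v) then 1 else 0))).sum))).sum
      = (t.map (fun u => (if pvJoin (tup u) = a then 1 else 0) * w u *
          (w z * (if pvR (tup u) (tup z) then 1 else 0)))).sum
        + (t.map (fun u => (if pvJoin (tup u) = a then 1 else 0) * w u *
          (t.map (fun v => w v * (if pvR (tup u) (tup v) then 1 else 0))).sum)).sum := by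
      rw [← List.sum_map_add]
      apply congrArg
      apply List.map_congr_left
      intro u _
      ring
    rw [hsplit]
    simp only [Bool.false_eq_true, if_false, mul_zero]
    ring

-- grouping a sum by distinct values
-- extract one element's term from a sum over a Nodup list
theorem pv_sum_extract {β : Type} [DecidableEq β] (x : β) (f : β → Nat) :
    ∀ (L : List β), L.Nodup → x ∈ L → (L.map f).sum = f x + ((L.filter (· ≠ x)).map f).sum := by
  intro L
  induction L with
  | nil => intro _ h; cases h
  | cons y t ih =>
    intro hnd hx
    by_cases h : y = x
    · subst h
      have hyt : y ∉ t := (List.nodup_cons.1 hnd).1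
      have hfil : t.filter (· ≠ y) = t := by
        apply List.filter_eq_self.mpr
        intro v hv
        rw [decide_eq_true_eq]
        rintro rfl
        exact hyt hv
      rw [List.filter_cons, if_neg (by simp), hfil, List.map_cons, List.sum_cons]
    · have hx' : x ∈ t := by
        rcases List.mem_cons.1 hx with e | e
        · exact absurd e.symm h
        · exact e
      rw [List.filter_cons, if_pos (by simp [h]), List.map_cons, List.sum_cons,
        List.map_cons, List.sum_cons, ih (List.nodup_cons.1 hnd).2 hx']
      omega

theorem pv_group_sum {β : Type} [BEq β] [LawfulBEq β] [DecidableEq β] (xs : List β) (g : β → Nat) :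
    ((PySem.List.dedup xs).map (fun v => xs.count v * g v)).sum = (xs.map g).sum := by
  induction xs with
  | nil => rfl
  | cons x t ih =>
    rw [pv_dedup_cons, pv_filter_beq_ne']
    have hcnt : ∀ v : β, (x :: t).count v = t.count v + (if x = v then 1 else 0) := by
      intro v
      rw [List.count_cons]
      by_cases h : x = v <;> simp [h]
    simp only [List.map_cons, List.sum_cons, hcnt]
    by_cases hx : x ∈ t
    · have hxded : x ∈ PySem.List.dedup t := (PySem.List.mem_dedup t x).2 hx
      have hext := pv_sum_extract x (fun v => t.count v * g v) (PySem.List.dedup t)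
        (PySem.List.nodup_dedup t) hxded
      have hfe : ∀ (L : List β), (L.filter (· ≠ x)).map (fun v => (t.count v + (if x = v then 1 else 0)) * g v)
          = (L.filter (· ≠ x)).map (fun v => t.count v * g v) := by
        intro L
        apply List.map_congr_left
        intro v hv
        have hvx : v ≠ x := by simpa using (List.mem_filter.1 hv).2
        have hxv : x ≠ v := fun e => hvx e.symm
        simp [hxv]
      rw [hfe, ← ih, hext]
      simp
      ring
    · have hcnt0 : t.count x = 0 := List.count_eq_zero.2 hx
      have hno : (PySem.List.dedup t).filter (· ≠ x) = PySem.List.dedup t := by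
        apply List.filter_eq_self.mpr
        intro v hv
        simp only [decide_eq_true_eq]
        rintro rfl
        exact hx ((PySem.List.mem_dedup t v).1 hv)
      have hfe : (PySem.List.dedup t).map (fun v => (t.count v + (if x = v then 1 else 0)) * g v)
          = (PySem.List.dedup t).map (fun v => t.count v * g v) := by
        apply List.map_congr_left
        intro v hv
        have hxv : x ≠ v := by
          rintro rfl
          exact hx ((PySem.List.mem_dedup t _).1 hv)
        simp [hxv]
      rw [hno, hfe, ← ih]
      simp [hcnt0]

theorem pvP_count_eq_pvW_count (xs : List (List Int)) (a : String) :
    (pvP xs).count a = (pvW xs).count a := by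
  have hP : (pvP xs).count a
      = (xs.map (fun u => (if pvJoin u = a then 1 else 0) * 1 *
          (xs.map (fun v => 1 * (if pvR u v then 1 else 0))).sum)).sum := by
    have h := pvBlocks_count (fun t : List Int => t) (fun _ => 1) a xs
    have hblk : (fun u v : List Int => if pvR u v then
        List.replicate (1 * 1) (pvJoin u) ++ List.replicate (1 * 1) (pvJoin v) else []) = pvBlk1 := by
      funext u v
      simp [pvBlk1]
    rw [hblk] at h
    exact h
  have hW : (pvW xs).count a
      = ((pvWgs xs).map (fun u => (if pvJoin u.1 = a then 1 else 0) * u.2 *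
          ((pvWgs xs).map (fun v => v.2 * (if pvR u.1 v.1 then 1 else 0))).sum)).sum := by
    have h := pvBlocks_count (fun q : List Int × Nat => q.1) (fun q => q.2) a (pvWgs xs)
    have hblk : (fun u v : List Int × Nat => if pvR u.1 v.1 then
        List.replicate (u.2 * v.2) (pvJoin u.1) ++ List.replicate (u.2 * v.2) (pvJoin v.1) else []) = pvBlkW := by
      funext u v
      simp [pvBlkW]
    rw [hblk] at h
    exact h
  rw [hP, hW]
  refine Eq.symm ?_
  -- sums over pvWgs are sums over dedup xs
  have hwgs : ∀ (F : List Int → Nat → Nat), ((pvWgs xs).map (fun q => F q.1 q.2)).sum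
      = ((PySem.List.dedup xs).map (fun v => F v (xs.count v))).sum := by
    intro F
    simp [pvWgs, Function.comp_def]
  have hinner : ∀ u : List Int,
      ((pvWgs xs).map (fun v => v.2 * (if pvR u v.1 then 1 else 0))).sum
        = (xs.map (fun v => 1 * (if pvR u v then 1 else 0))).sum := by
    intro u
    rw [hwgs (fun t m => m * (if pvR u t then 1 else 0))]
    calc ((PySem.List.dedup xs).map (fun v => xs.count v * (if pvR u v then 1 else 0))).sum
        = (xs.map (fun v => if pvR u v then 1 else 0)).sum :=
          pv_group_sum xs (fun v => if pvR u v then 1 else 0)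
      _ = (xs.map (fun v => 1 * (if pvR u v then 1 else 0))).sum := by
          apply congrArg; apply List.map_congr_left; intro v _; ring
  calc ((pvWgs xs).map (fun u => (if pvJoin u.1 = a then 1 else 0) * u.2 *
          ((pvWgs xs).map (fun v => v.2 * (if pvR u.1 v.1 then 1 else 0))).sum)).sum
      = ((PySem.List.dedup xs).map (fun u => xs.count u * ((if pvJoin u = a then 1 else 0) *
          (xs.map (fun v => 1 * (if pvR u v then 1 else 0))).sum))).sum := by
        rw [hwgs (fun t m => (if pvJoin t = a then 1 else 0) * m *
          ((pvWgs xs).map (fun v => v.2 * (if pvR t v.1 then 1 else 0))).sum)]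
        apply congrArg
        apply List.map_congr_left
        intro v _
        rw [hinner v]
        ring
    _ = (xs.map (fun u => (if pvJoin u = a then 1 else 0) *
          (xs.map (fun v => 1 * (if pvR u v then 1 else 0))).sum)).sum := by
        rw [pv_group_sum xs (fun u => (if pvJoin u = a then 1 else 0) *
          (xs.map (fun v => 1 * (if pvR u v then 1 else 0))).sum)]
    _ = (xs.map (fun u => (if pvJoin u = a then 1 else 0) * 1 *
          (xs.map (fun v => 1 * (if pvR u v then 1 else 0))).sum)).sum := by
        apply congrArg
        apply List.map_congr_left
        intro v _
        ring

-- ---------- counters ----------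

theorem pv_counter_ext {κ : Type} [BEq κ] [LawfulBEq κ] (L L' : List κ)
    (hd : PySem.List.dedup L = PySem.List.dedup L') (hc : ∀ a, L.count a = L'.count a) :
    PySem.Dict.counter L = PySem.Dict.counter L' := by
  apply PySem.Dict.ext
  rw [PySem.Dict.items_counter, PySem.Dict.items_counter,
    ← PySem.List.dedup_eq_ofList, ← PySem.List.dedup_eq_ofList, hd]
  apply List.map_congr_left
  intro k _
  rw [hc k]

theorem pv_counter_P_eq_W (xs : List (List Int)) :
    PySem.Dict.counter (pvP xs) = PySem.Dict.counter (pvW xs) := by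
  apply pv_counter_ext
  · rw [pvP_dedup, pvW_dedup]
  · intro a
    exact pvP_count_eq_pvW_count xs a

-- ---------- flattening the ports' index loops ----------

theorem pv_getD_cons_shift {γ : Type} (z : γ) (t : List γ) (d : γ) (i : Int) (hi : 0 ≤ i) :
    PySem.List.pyGetD (z :: t) (i + 1) d = PySem.List.pyGetD t i d := by
  obtain ⟨n, rfl⟩ : ∃ n : Nat, i = (n : Int) := ⟨i.toNat, (Int.toNat_of_nonneg hi).symm⟩
  rw [show ((n : Int) + 1) = ((n + 1 : Nat) : Int) by push_cast; ring,
    PySem.List.pyGetD_natCast, PySem.List.pyGetD_natCast]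
  rfl

theorem pv_pairFold_eq {γ δ : Type} (F : δ → γ → γ → δ) (dflt : γ) :
    ∀ (gs : List γ) (init : δ),
      (PySem.List.pyRange 0 (gs.length : Int)).foldl (fun d u =>
        (PySem.List.pyRange (u + 1) (gs.length : Int)).foldl (fun d v =>
          F d (PySem.List.pyGetD gs u dflt) (PySem.List.pyGetD gs v dflt)) d) init
      = pvPairFold F gs init := by
  intro gs
  induction gs with
  | nil =>
    intro init
    rw [show ((([] : List γ).length : Int)) = 0 by simp, PySem.List.pyRange_one_eq_nil le_rfl]
    rfl
  | cons z t ih =>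
    intro init
    have hlen : (((z :: t).length : Int)) = (t.length : Int) + 1 := by simp
    have hpos : (0 : Int) < ((z :: t).length : Int) := by simp
    rw [PySem.List.pyRange_one_cons hpos, List.foldl_cons]
    have hget0 : PySem.List.pyGetD (z :: t) 0 dflt = z := by
      rw [show (0 : Int) = ((0 : Nat) : Int) from rfl, PySem.List.pyGetD_natCast]
      rfl
    have hrow0 : (PySem.List.pyRange (0 + 1) ((z :: t).length : Int)).foldl
        (fun d v => F d (PySem.List.pyGetD (z :: t) 0 dflt) (PySem.List.pyGetD (z :: t) v dflt)) init
        = t.foldl (fun d v => F d z v) init := by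
      rw [show (0 + 1 : Int) = 1 by ring]
      have := PySem.List.foldl_pyRange_pyGetD' (z :: t) dflt
        (fun d v => F d z v) init (a := 1) (by norm_num)
      simp only [hget0]
      rw [this]
      rfl
    rw [hrow0]
    show (PySem.List.pyRange 1 ((z :: t).length : Int)).foldl (fun d u =>
        (PySem.List.pyRange (u + 1) ((z :: t).length : Int)).foldl (fun d v =>
          F d (PySem.List.pyGetD (z :: t) u dflt) (PySem.List.pyGetD (z :: t) v dflt)) d)
        (t.foldl (fun d v => F d z v) init)
      = pvPairFold F t (t.foldl (fun d v => F d z v) init)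
    rw [← ih (t.foldl (fun d v => F d z v) init)]
    -- reindex the outer range by +1
    rw [PySem.List.pyRange_one, PySem.List.pyRange_one]
    have hn1 : (((z :: t).length : Int) - 1).toNat = t.length := by simp
    have hn2 : (((t.length : Int)) - 0).toNat = t.length := by simp
    rw [hn1, hn2, List.foldl_map, List.foldl_map]
    apply PySem.List.foldl_congr_mem
    intro acc k hk
    have hk' : k < t.length := List.mem_range.1 hk
    have hshift : PySem.List.pyGetD (z :: t) (1 + (k : Int)) dflt = PySem.List.pyGetD t (k : Int) dflt := by
      rw [show (1 + (k : Int)) = (k : Int) + 1 by ring]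
      exact pv_getD_cons_shift z t dflt _ (by positivity)
    have hzero : ((0 : Int) + (k : Int)) = (k : Int) := by ring
    rw [hzero, hshift]
    -- reindex the inner range by +1
    rw [PySem.List.pyRange_one, PySem.List.pyRange_one]
    have hi1 : ((((z :: t).length : Int)) - (1 + (k : Int) + 1)).toNat = ((((t.length : Int)) - ((k : Int) + 1)).toNat) := by
      simp only [List.length_cons]
      omega
    rw [hi1, List.foldl_map, List.foldl_map]
    apply PySem.List.foldl_congr_mem
    intro acc2 j _
    have hj : (1 + (k : Int) + 1 + (j : Int)) = ((k : Int) + 1 + (j : Int)) + 1 := by ring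
    rw [hj, pv_getD_cons_shift z t dflt _ (by positivity)]

-- append-style pair folds are the emission lists
theorem pv_pairFold_append {γ σ : Type} (g : γ → γ → List σ) :
    ∀ (gs : List γ) (init : List σ), pvPairFold (fun d u v => d ++ g u v) gs init = init ++ pvBlocks g gs := by
  intro gs
  induction gs with
  | nil => intro init; simp [pvPairFold, pvBlocks]
  | cons z t ih =>
    intro init
    show pvPairFold _ t (t.foldl (fun d v => d ++ g z v) init) = init ++ (t.flatMap (g z) ++ pvBlocks g t)
    rw [ih, PySem.List.foldl_append_eq_flatMap, List.append_assoc]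

-- composing the emitted blocks with a per-pair flatMap
theorem pv_blocks_flatMap {γ σ τ : Type} (g : γ → γ → List σ) (h : σ → List τ) :
    ∀ (zs : List γ), (pvBlocks g zs).flatMap h = pvBlocks (fun u v => (g u v).flatMap h) zs := by
  intro zs
  induction zs with
  | nil => rfl
  | cons z t ih =>
    show ((t.flatMap (g z) ++ pvBlocks g t).flatMap h) = _
    rw [List.flatMap_append, ih, List.flatMap_assoc]
    rfl

-- blocks over a mapped list
theorem pv_blocks_map {γ γ' σ : Type} (h : γ → γ') (g : γ' → γ' → List σ) :
    ∀ (zs : List γ), pvBlocks g (zs.map h) = pvBlocks (fun u v => g (h u) (h v)) zs := by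
  intro zs
  induction zs with
  | nil => rfl
  | cons z t ih =>
    show (t.map h).flatMap (g (h z)) ++ pvBlocks g (t.map h) = _
    rw [List.flatMap_map, ih]
    rfl

-- ---------- fusing B's dict loop into a counter ----------

theorem pv_counter_insert_rep {κ : Type} [BEq κ] [LawfulBEq κ] (l0 : List κ) (k : κ) (n : Nat) (hn : 1 ≤ n) :
    (PySem.Dict.counter l0).insert k ((PySem.Dict.counter l0).getD k 0 + (n : Int))
      = PySem.Dict.counter (l0 ++ List.replicate n k) := by
  induction n with
  | zero => cases hn
  | succ m ih =>
    have hstep : ∀ (L : List κ), PySem.Dict.counter (L ++ [k])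
        = (PySem.Dict.counter L).insert k ((PySem.Dict.counter L).getD k 0 + 1) := by
      intro L
      rw [← PySem.Dict.foldl_insert_getD_add_one_eq_counter, List.foldl_append,
        PySem.Dict.foldl_insert_getD_add_one_eq_counter]
      rfl
    rcases Nat.eq_zero_or_pos m with hm | hm
    · subst hm
      rw [show List.replicate 1 k = [k] from rfl, hstep l0]
      norm_num
    · rw [List.replicate_succ', ← List.append_assoc, hstep, ← ih hm,
        PySem.Dict.getD_insert_self, PySem.Dict.insert_insert_self]
      congr 1
      push_cast
      ring

-- ---------- assembling the two ports ----------

-- compare_subtypes is the mutual-prefix test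
theorem pv_compare : ∀ a b : List Int, compare_subtypes a b = (List.take b.length a == List.take a.length b) := by
  intro a
  induction a with
  | nil => intro b; cases b <;> simp [compare_subtypes]
  | cons x xs ih =>
    intro b
    cases b with
    | nil => simp [compare_subtypes]
    | cons y ys =>
      simp only [compare_subtypes, List.length_cons, List.take_succ_cons]
      by_cases hxy : x = y
      · subst hxy; simp [ih]
      · simp [hxy]

theorem pv_not_compare (a b : List Int) : (!compare_subtypes a b) = pvR a b := by
  rw [pv_compare]; rfl

-- dropping the empty last row of A's outer loop
theorem pv_outer_ext {δ : Type} (n : Int) (G : δ → Int → δ) (init : δ)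
    (hlast : ∀ acc, G acc (n - 1) = acc) :
    (PySem.List.pyRange 0 (n - 1)).foldl G init = (PySem.List.pyRange 0 n).foldl G init := by
  rcases le_or_gt n 0 with h | h
  · rw [PySem.List.pyRange_one_eq_nil (by omega), PySem.List.pyRange_one_eq_nil (by omega)]
  · have hsplit : PySem.List.pyRange 0 n = PySem.List.pyRange 0 (n - 1) ++ [n - 1] := by
      have := PySem.List.pyRange_one_succ_right (a := 0) (b := n - 1) (by omega)
      rw [show (n - 1) + 1 = n by ring] at this
      exact this
    rw [hsplit, List.foldl_append]
    simp [hlast]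

theorem pvA_eq (xs : List (List Int)) :
    find_inconsistent_subtypes xs
      = pvMostCommonTake (PySem.List.sorted (PySem.Dict.counter (pvP xs)).items (fun kv => kv.2) true) := by
  simp only [find_inconsistent_subtypes]
  congr 2
  -- the pair-collecting loop
  rw [pv_outer_ext (xs.length : Int) _ _ (by
    intro acc
    rw [show ((xs.length : Int) - 1) + 1 = (xs.length : Int) by ring,
      PySem.List.pyRange_one_eq_nil le_rfl]
    rfl)]
  rw [pv_pairFold_eq (fun d a b => if (!compare_subtypes a b) = true then d ++ [(a, b)] else d)
    ([] : List Int) xs []]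
  have hF : (fun (d : List (List Int × List Int)) a b => if (!compare_subtypes a b) = true then d ++ [(a, b)] else d)
      = (fun d a b => d ++ (if (!compare_subtypes a b) = true then [(a, b)] else [])) := by
    funext d a b
    by_cases h : (!compare_subtypes a b) = true <;> simp [h]
  rw [hF, pv_pairFold_append, List.nil_append, PySem.List.foldl_append_eq_flatMap, List.nil_append,
    pv_blocks_flatMap]
  have hblk : (fun u v => (if (!compare_subtypes u v) = true then [(u, v)] else []).flatMap
      (fun p => [pvJoin p.1, pvJoin p.2])) = pvBlk1 := by
    funext u v
    by_cases h : (!compare_subtypes u v) = true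
    · have hR : pvR u v = true := by rw [← pv_not_compare]; exact h
      simp [h, pvBlk1, hR]
    · have hR : pvR u v = false := by rw [← pv_not_compare]; exact Bool.eq_false_iff.2 h
      simp [h, pvBlk1, hR]
  rw [hblk]
  rfl

-- the zip/any test is pvR
theorem pv_zip_any : ∀ a b : List Int, ((a.zip b).any (fun c => decide (c.1 ≠ c.2))) = pvR a b := by
  intro a
  induction a with
  | nil => intro b; cases b <;> simp [pvR]
  | cons x xs ih =>
    intro b
    cases b with
    | nil => simp [pvR]
    | cons y ys =>
      simp only [List.zip_cons_cons, List.any_cons]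
      by_cases hxy : x = y
      · subst hxy
        rw [ih ys]
        simp [pvR, List.take_succ_cons]
      · simp [pvR, hxy]

-- B's weighted block over the precomputed (subtype, string, multiplicity) triples
def pvBlkWI (u v : List Int × String × Int) : List String :=
  if pvR u.1 v.1 then List.replicate ((u.2.2 * v.2.2).toNat) u.2.1
    ++ List.replicate ((u.2.2 * v.2.2).toNat) v.2.1 else []

-- B's inner loop builds the counter of the emitted strings
theorem pv_fuse_row (u : List Int × String × Int) (hu : 1 ≤ u.2.2) :
    ∀ (t : List (List Int × String × Int)), (∀ p ∈ t, 1 ≤ p.2.2) → ∀ (l0 : List String),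
      t.foldl (fun d pv =>
        if (u.1.zip pv.1).any (fun c => decide (c.1 ≠ c.2)) then
          ((d.insert u.2.1 (d.getD u.2.1 0 + u.2.2 * pv.2.2)).insert pv.2.1
            ((d.insert u.2.1 (d.getD u.2.1 0 + u.2.2 * pv.2.2)).getD pv.2.1 0 + u.2.2 * pv.2.2))
        else d) (PySem.Dict.counter l0)
      = PySem.Dict.counter (l0 ++ t.flatMap (pvBlkWI u)) := by
  intro t
  induction t with
  | nil => intro _ l0; simp
  | cons v r ih =>
    intro hw l0
    have hv : 1 ≤ v.2.2 := hw v List.mem_cons_self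
    have hn : (1 : Int) ≤ u.2.2 * v.2.2 := by nlinarith
    rw [List.foldl_cons]
    by_cases hR : pvR u.1 v.1 = true
    · rw [pv_zip_any u.1 v.1, hR, if_pos rfl]
      have hcast : u.2.2 * v.2.2 = (((u.2.2 * v.2.2).toNat : Nat) : Int) := (Int.toNat_of_nonneg (by linarith)).symm
      rw [hcast, pv_counter_insert_rep _ _ _ (by omega), pv_counter_insert_rep _ _ _ (by omega),
        ih (fun p hp => hw p (List.mem_cons_of_mem _ hp))]
      simp only [List.flatMap_cons, pvBlkWI, hR, if_true, List.append_assoc]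
    · have hR' : pvR u.1 v.1 = false := Bool.eq_false_iff.2 hR
      rw [pv_zip_any u.1 v.1, hR', if_neg (by simp), ih (fun p hp => hw p (List.mem_cons_of_mem _ hp))]
      simp [pvBlkWI, hR']

theorem pv_fuse : ∀ (gs : List (List Int × String × Int)), (∀ p ∈ gs, 1 ≤ p.2.2) → ∀ (l0 : List String),
    pvPairFold (fun d pu pv =>
      if (pu.1.zip pv.1).any (fun c => decide (c.1 ≠ c.2)) then
        ((d.insert pu.2.1 (d.getD pu.2.1 0 + pu.2.2 * pv.2.2)).insert pv.2.1
          ((d.insert pu.2.1 (d.getD pu.2.1 0 + pu.2.2 * pv.2.2)).getD pv.2.1 0 + pu.2.2 * pv.2.2))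
      else d) gs (PySem.Dict.counter l0)
    = PySem.Dict.counter (l0 ++ pvBlocks pvBlkWI gs) := by
  intro gs
  induction gs with
  | nil => intro _ l0; simp [pvPairFold, pvBlocks]
  | cons u t ih =>
    intro hw l0
    show pvPairFold _ t _ = _
    rw [pv_fuse_row u (hw u List.mem_cons_self) t (fun p hp => hw p (List.mem_cons_of_mem _ hp)) l0,
      ih (fun p hp => hw p (List.mem_cons_of_mem _ hp)), List.append_assoc]
    rfl

theorem pvB_eq (xs : List (List Int)) :
    find_inconsistent_subtypes_alt xs
      = pvTakeB (PySem.List.sorted (PySem.Dict.counter (pvW xs)).items (fun kv => kv.2) true) := by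
  simp only [find_inconsistent_subtypes_alt, PySem.Dict.foldl_insert_getD_add_one_eq_counter]
  congr 2
  rw [PySem.Dict.items_counter, List.map_map]
  have hw : ∀ p ∈ (PySem.Set.ofList xs).map
      ((fun p : List Int × Int => (p.1, pvJoin p.1, p.2)) ∘ (fun k => (k, (xs.count k : Int)))), 1 ≤ p.2.2 := by
    intro p hp
    simp only [List.mem_map, Function.comp_def] at hp
    obtain ⟨k, hk, rfl⟩ := hp
    have : k ∈ xs := by
      rw [← PySem.List.dedup_eq_ofList] at hk
      exact (PySem.List.mem_dedup xs k).1 hk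
    show (1 : Int) ≤ ((xs.count k : Nat) : Int)
    exact_mod_cast List.count_pos_iff.mpr this
  rw [pv_pairFold_eq (fun d (pu pv : List Int × String × Int) =>
      if (pu.1.zip pv.1).any (fun c => decide (c.1 ≠ c.2)) then
        ((d.insert pu.2.1 (d.getD pu.2.1 0 + pu.2.2 * pv.2.2)).insert pv.2.1
          ((d.insert pu.2.1 (d.getD pu.2.1 0 + pu.2.2 * pv.2.2)).getD pv.2.1 0 + pu.2.2 * pv.2.2))
      else d) (([], "", 0) : List Int × String × Int) _ PySem.Dict.empty]
  rw [show (PySem.Dict.empty : PySem.Dict String Int) = PySem.Dict.counter [] from rfl,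
    pv_fuse _ hw [], List.nil_append]
  congr 1
  rw [pv_blocks_map]
  unfold pvW pvWgs
  rw [pv_blocks_map, PySem.List.dedup_eq_ofList]
  have hfun : (fun (u v : List Int) => pvBlkWI (u, pvJoin u, (xs.count u : Int)) (v, pvJoin v, (xs.count v : Int)))
      = (fun (u v : List Int) => pvBlkW (u, xs.count u) (v, xs.count v)) := by
    funext u v
    simp only [pvBlkWI, pvBlkW]
    rw [← Nat.cast_mul, Int.toNat_natCast]
  show PySem.Dict.counter (pvBlocks (fun u v => pvBlkWI (u, pvJoin u, (xs.count u : Int)) (v, pvJoin v, (xs.count v : Int))) (PySem.Set.ofList xs))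
    = PySem.Dict.counter (pvBlocks (fun u v => pvBlkW (u, xs.count u) (v, xs.count v)) (PySem.Set.ofList xs))
  rw [hfun]

theorem pvTake_eq : ∀ (l : List (String × Int)), pvMostCommonTake l = pvTakeB l := by
  intro l
  induction l with
  | nil => rfl
  | cons p rest ih => obtain ⟨s, f⟩ := p; simp only [pvMostCommonTake, pvTakeB]; rw [ih]

-- ===== VERDICT (by name: the statement is the Claim_ definition above) =====
theorem find_inconsistent_subtypes_spec : Claim_equal_find_inconsistent_subtypes := by
  intro xs _
  unfold Spec_find_inconsistent_subtypes
  rw [pvA_eq, pvB_eq, pv_counter_P_eq_W, pvTake_eq]
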